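-- pv_equiv track=rewrite | github.com/faratech/htop-win | scripts/update-deps.py | version_matches
-- ===== SOURCE A (Python) =====
-- def version_matches(spec: str, version: str) -> bool:
--     """Check if a version matches a version spec (e.g., "0.29" matches "0.29.0")."""
--     spec_parts = spec.split('.')
--     version_parts = version.split('.')
--
--     for i, spec_part in enumerate(spec_parts):
--         if i >= len(version_parts):
--             return False
--         if spec_part != version_parts[i]:
--             return False
--     return True
-- ===== SOURCE B (Python) =====
-- def version_matches(spec: str, version: str) -> bool:
--     """Check if a version matches a version spec (e.g., "0.29" matches "0.29.0")."""
--     return version == spec or version.startswith(spec + '.')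
-- ===== Notes on version B (the rewrite author's own statement) =====
-- stated objective: simpler
-- what changed: Eliminates the dot-splitting entirely: instead of tokenising both strings and comparing part lists, B decides the same predicate by pure string comparison — version equals spec, or version starts with spec followed by a dot.
import Mathlib
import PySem

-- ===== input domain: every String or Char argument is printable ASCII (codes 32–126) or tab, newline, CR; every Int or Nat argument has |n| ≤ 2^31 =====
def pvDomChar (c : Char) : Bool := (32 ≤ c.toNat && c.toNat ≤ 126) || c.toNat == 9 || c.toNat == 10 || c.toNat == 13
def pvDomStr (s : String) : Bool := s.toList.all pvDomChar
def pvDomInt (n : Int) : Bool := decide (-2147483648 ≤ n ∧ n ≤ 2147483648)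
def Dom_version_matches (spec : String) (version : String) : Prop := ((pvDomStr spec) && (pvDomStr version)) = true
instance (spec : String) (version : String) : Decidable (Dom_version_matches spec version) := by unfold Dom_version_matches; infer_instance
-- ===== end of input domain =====

-- B avoids splitting on '.' altogether: it decides the same predicate by string
-- comparison alone — version == spec, or version starts with spec + '.' (objective: simpler).


-- ===== PORT A =====
-- the 'for i, spec_part in enumerate(spec_parts)' loop with its two early returns;
-- version_parts[i] is in range in the branch reached (the guard just returned False otherwise),
-- so pyGetD's default is never used.
def vmLoopA (vparts : List String) : List (Int × String) → Bool
  | [] => true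
  | (i, spec_part) :: rest =>
      if (vparts.length : Int) ≤ i then false
      else if spec_part ≠ PySem.List.pyGetD vparts i "" then false
      else vmLoopA vparts rest

def version_matches (spec : String) (version : String) : Bool :=
  -- s.split('.') with a nonempty separator always succeeds, hence getD []
  let spec_parts := (PySem.Str.split? spec ".").getD []
  let version_parts := (PySem.Str.split? version ".").getD []
  vmLoopA version_parts (PySem.List.enumerate spec_parts 0)

-- ===== PORT B =====
-- B never splits: version == spec or version.startswith(spec + '.')
def version_matches_alt (spec : String) (version : String) : Bool :=
  (version == spec) || PySem.Str.startswith version (spec ++ ".")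

-- ===== PRECONDITION & SPEC =====
def Spec_version_matches (spec : String) (version : String) (out : Bool) : Prop := out = version_matches_alt spec version
instance (spec : String) (version : String) (out : Bool) : Decidable (Spec_version_matches spec version out) := by unfold Spec_version_matches; infer_instance

-- ===== CLAIM =====
def Claim_equal_version_matches : Prop := ∀ (spec : String) (version : String), Dom_version_matches spec version → Spec_version_matches spec version (version_matches spec version)

-- ===== LEMMAS AND PROOFS =====

-- A's loop is the take-prefix comparison (proved once, reused below).
theorem vmLoopA_eq_take (sp : List String) : ∀ (vp : List String) (s : Nat),
    vmLoopA vp (PySem.List.enumerate sp (s : Int)) = (((vp.drop s).take sp.length) == sp) := by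
  induction sp with
  | nil => intro vp s; simp [vmLoopA, PySem.List.enumerate_nil]
  | cons x rest ih =>
    intro vp s
    rw [PySem.List.enumerate_cons, vmLoopA]
    by_cases hlen : vp.length ≤ s
    · have h1 : ((vp.length : Int) ≤ (s : Int)) = True := by simp; exact_mod_cast hlen
      have hdrop : vp.drop s = [] := List.drop_eq_nil_of_le hlen
      simp [h1, hdrop]
    · rw [Nat.not_le] at hlen
      have h1 : ¬ ((vp.length : Int) ≤ (s : Int)) := by exact_mod_cast Nat.not_le.mpr hlen
      have hget : PySem.List.pyGetD vp (s : Int) "" = vp[s] := by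
        rw [PySem.List.pyGetD_natCast]; exact List.getD_eq_getElem vp "" hlen
      have hdrop : vp.drop s = vp[s] :: vp.drop (s + 1) := List.drop_eq_getElem_cons hlen
      have hcast : ((s : Int) + 1) = ((s + 1 : Nat) : Int) := by push_cast; ring
      by_cases hx : x = vp[s]
      · rw [if_neg h1, hget, hx]
        simp only [ne_eq, not_true_eq_false, if_false, hcast, ih vp (s + 1), hdrop,
          List.length_cons, List.take_succ_cons]
        simp
      · have hne : (x ≠ PySem.List.pyGetD vp (s : Int) "") = True := by simp [hget, hx]
        simp only [h1, if_false, hne, if_true, hdrop, List.length_cons, List.take_succ_cons]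
        simp [Ne.symm hx]

-- cons a piece onto the head of a (nonempty) split result
def chd (p : List Char) : List (List Char) → List (List Char)
  | [] => [p]
  | h :: t => (p ++ h) :: t

-- a direct structural recursion computing s.split('.')
def dsplit : List Char → List (List Char)
  | [] => [[]]
  | c :: t => if c = '.' then [] :: dsplit t else chd [c] (dsplit t)

theorem dsplit_ne_nil (s : List Char) : dsplit s ≠ [] := by
  cases s with
  | nil => simp [dsplit]
  | cons c t =>
    by_cases h : c = '.'
    · simp [dsplit, h]
    · simp only [dsplit, if_neg h]
      cases dsplit t <;> simp [chd]

theorem go_eq_dsplit : ∀ (l : List Char) (fuel : Nat) (cur : List Char) (acc : List (List Char)),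
    l.length ≤ fuel →
    PySem.Chars.splitOn.go ['.'] fuel l cur acc = acc.reverse ++ chd cur.reverse (dsplit l) := by
  intro l
  induction l with
  | nil =>
    intro fuel cur acc _
    cases fuel <;> simp [PySem.Chars.splitOn.go, dsplit, chd]
  | cons c rest ih =>
    intro fuel cur acc hle
    cases fuel with
    | zero => simp at hle
    | succ f =>
      rw [PySem.Chars.splitOn.go.eq_def]
      simp only []
      by_cases h : c = '.'
      · have hp : List.isPrefixOf ['.'] (c :: rest) = true := by simp [h, List.isPrefixOf]
        rw [if_pos hp]
        have : List.drop (['.'] : List Char).length (c :: rest) = rest := by simp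
        rw [this, ih f [] (cur.reverse :: acc) (by simpa using Nat.le_of_succ_le_succ hle)]
        simp only [dsplit, if_pos h, List.reverse_cons, List.reverse_nil]
        cases hd : dsplit rest with
        | nil => exact absurd hd (dsplit_ne_nil rest)
        | cons x y => simp [chd]
      · have hp : List.isPrefixOf ['.'] (c :: rest) = false := by
          simp [List.isPrefixOf, Ne.symm h]
        rw [if_neg (by simp [hp])]
        rw [ih f (c :: cur) acc (by simpa using Nat.le_of_succ_le_succ hle)]
        simp only [dsplit, if_neg h, List.reverse_cons]
        cases dsplit rest <;> simp [chd]

theorem splitOn_eq_dsplit (s : List Char) : PySem.Chars.splitOn s ['.'] = dsplit s := by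
  unfold PySem.Chars.splitOn
  rw [go_eq_dsplit s (s.length + 1) [] [] (Nat.le_succ _)]
  cases h : dsplit s with
  | nil => exact absurd h (dsplit_ne_nil s)
  | cons a b => simp [chd]

-- the heart: part-list prefix ⟺ string-level equality-or-dot-prefix
theorem dsplit_prefix_iff : ∀ (s v : List Char),
    (dsplit s <+: dsplit v) ↔ (s = v ∨ (s ++ ['.']) <+: v) := by
  intro s
  induction s with
  | nil =>
    intro v
    cases v with
    | nil => simp [dsplit]
    | cons c t =>
      by_cases h : c = '.'
      · subst h; simp [dsplit]
      · simp only [dsplit, if_neg h]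
        cases hd : dsplit t with
        | nil => exact absurd hd (dsplit_ne_nil t)
        | cons x y => simp [chd, List.cons_prefix_cons, Ne.symm h]
  | cons a s' ih =>
    intro v
    cases v with
    | nil =>
      constructor
      · intro hp
        exfalso
        by_cases h : a = '.'
        · rw [show dsplit (a :: s') = [] :: dsplit s' by simp [dsplit, h]] at hp
          exact dsplit_ne_nil s' (by simpa [dsplit] using hp)
        · rw [show dsplit (a :: s') = chd [a] (dsplit s') by simp [dsplit, h]] at hp
          cases hd : dsplit s' with
          | nil => exact dsplit_ne_nil s' hd
          | cons x y =>
            rw [hd] at hp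
            simp [chd, dsplit, List.cons_prefix_cons] at hp
      · intro hp
        exfalso
        rcases hp with hp | hp
        · exact List.cons_ne_nil a s' hp
        · have := List.prefix_nil.mp hp
          simp at this
    | cons b v' =>
      by_cases ha : a = '.' <;> by_cases hb : b = '.'
      · subst ha; subst hb
        simp [dsplit, List.cons_prefix_cons, ih v']
      · subst ha
        simp only [dsplit, if_neg hb]
        cases hd : dsplit v' with
        | nil => exact absurd hd (dsplit_ne_nil v')
        | cons x y =>
          simp [chd, List.cons_prefix_cons, Ne.symm hb]
      · subst hb
        simp only [dsplit, if_neg ha]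
        cases hd : dsplit s' with
        | nil => exact absurd hd (dsplit_ne_nil s')
        | cons x y =>
          simp [chd, List.cons_prefix_cons, ha]
      · simp only [dsplit, if_neg ha, if_neg hb]
        cases hds : dsplit s' with
        | nil => exact absurd hds (dsplit_ne_nil s')
        | cons xs ys =>
          cases hdv : dsplit v' with
          | nil => exact absurd hdv (dsplit_ne_nil v')
          | cons xv yv =>
            have hiv := ih v'
            rw [hds, hdv, List.cons_prefix_cons] at hiv
            simp only [chd, List.cons_prefix_cons, List.cons_append, List.cons.injEq,
              List.nil_append]
            tauto

-- s.split('.') always succeeds and its parts (as char lists) are dsplit s.toList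
theorem split_dot (s : String) : ∃ ls, PySem.Str.split? s "." = some ls ∧
    ls.map String.toList = dsplit s.toList := by
  have h := PySem.Str.split?_map s "."
  have hc : PySem.Chars.split? s.toList (".").toList = some (dsplit s.toList) := by
    simp [PySem.Chars.split?, splitOn_eq_dsplit]
  rw [hc] at h
  cases hsp : PySem.Str.split? s "." with
  | none => rw [hsp] at h; simp at h
  | some ls =>
    rw [hsp] at h
    exact ⟨ls, rfl, Option.some.inj h⟩

theorem prefix_map_iff {α β : Type} (f : α → β) (hf : Function.Injective f) (l m : List α) :
    (l.map f <+: m.map f) ↔ l <+: m := by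
  constructor
  · intro h
    rw [List.prefix_iff_eq_take] at h ⊢
    rw [List.length_map, ← List.map_take] at h
    exact List.map_injective_iff.mpr hf h
  · exact fun h => h.map f

-- ===== VERDICT =====
theorem version_matches_spec : Claim_equal_version_matches := by
  intro spec version _
  unfold Spec_version_matches version_matches version_matches_alt
  obtain ⟨ls, hls, hlsv⟩ := split_dot spec
  obtain ⟨lv, hlv, hlvv⟩ := split_dot version
  rw [hls, hlv]
  simp only [Option.getD_some]
  rw [show (0 : Int) = ((0 : Nat) : Int) from rfl, vmLoopA_eq_take, List.drop_zero]
  have hmap : (ls.map String.toList <+: lv.map String.toList) ↔ ls <+: lv :=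
    prefix_map_iff String.toList (fun _ _ h => String.toList_inj.mp h) ls lv
  have hA : (lv.take ls.length == ls) = decide (dsplit spec.toList <+: dsplit version.toList) := by
    rw [← hlsv, ← hlvv]
    by_cases hpre : ls <+: lv
    · rw [decide_eq_true (hmap.mpr hpre)]
      have h2 := List.prefix_iff_eq_take.mp hpre
      simp [← h2]
    · rw [decide_eq_false (fun hc => hpre (hmap.mp hc))]
      simp only [beq_eq_false_iff_ne, ne_eq]
      intro he
      exact hpre (List.prefix_iff_eq_take.mpr he.symm)
  rw [hA]
  by_cases hd : dsplit spec.toList <+: dsplit version.toList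
  · rw [decide_eq_true hd]
    symm
    rcases (dsplit_prefix_iff _ _).mp hd with he | hp
    · simp [String.toList_inj.mp he]
    · rw [PySem.Str.startswith_eq]
      rw [Bool.or_eq_true]
      exact Or.inr (by rw [PySem.Chars.startswith_iff, String.toList_append]; exact hp)
  · rw [decide_eq_false hd]
    symm
    have hne : ¬ version = spec :=
      fun he => hd ((dsplit_prefix_iff _ _).mpr (Or.inl (by rw [he])))
    have hns : PySem.Str.startswith version (spec ++ ".") = false := by
      rw [PySem.Str.startswith_eq]
      rw [← Bool.not_eq_true, PySem.Chars.startswith_iff, String.toList_append]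
      exact fun hp => hd ((dsplit_prefix_iff _ _).mpr (Or.inr hp))
    rw [Bool.or_eq_false_iff]
    exact ⟨beq_eq_false_iff_ne.mpr hne, hns⟩
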